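-- pv_equiv track=rewrite | github.com/cutehammond772/problem-solving-archive | 백준/Gold/31003. 언젠가 정렬이 될 수 있으면 좋겠네．/언젠가 정렬이 될 수 있으면 좋겠네．.py | solve
-- ===== SOURCE A (Python) =====
-- from heapq import heapify, heappush, heappop
--
-- def gcd(x, y):
--   if x > y:
--     x, y = y, x
--
--   while y:
--     x, y = y, x % y
--
--   return x
--
-- def solve(N, A):
--   # dependency 그래프
--   G = [[] for _ in range(N)]
--
--   # 진입 차수
--   degrees = [0] * N
--
--   for node in range(N - 1):
--     for next in range(node + 1, N):
--       if gcd(A[node], A[next]) == 1: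
--         continue
--
--       G[node].append(next)
--       degrees[next] += 1
--
--   # 가장 작은 수가 먼저 나오도록 함
--   heap = [(A[node], node) for node in range(N) if degrees[node] == 0]
--   heapify(heap)
--
--   result = []
--
--   while heap:
--     element, node = heappop(heap)
--     result.append(element)
--
--     for next in G[node]:
--       degrees[next] -= 1
--
--       if degrees[next] == 0:
--         heappush(heap, (A[next], next))
--
--   return result
-- ===== SOURCE B (Python) =====
-- def solve(N, A):
--     # Simpler greedy: sort the (value, index) pairs once, then repeatedly take the
--     # first pair whose index has no remaining earlier non-coprime index.
--     def gcd(x, y):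
--         if x > y:
--             x, y = y, x
--         while y:
--             x, y = y, x % y
--         return x
--
--     order = sorted((A[j], j) for j in range(N))
--     removed = [False] * N
--     out = []
--     for _ in range(N):
--         pick = None
--         for v, j in order:
--             if removed[j]:
--                 continue
--             if all(removed[i] or gcd(A[i], v) == 1 for i in range(j)):
--                 pick = j
--                 break
--         if pick is None:
--             break
--         out.append(A[pick])
--         removed[pick] = True
--     return out
-- ===== Notes on version B (the rewrite author's own statement) =====
-- stated objective: simpler
-- what changed: B drops A's explicit dependency graph, indegree array and binary heap entirely: it sorts the (value, index) pairs once and then repeatedly scans that sorted list for the first index all of whose remaining earlier indices are coprime to it, which is exactly the minimum ready element A's heap pops.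
import Mathlib
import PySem

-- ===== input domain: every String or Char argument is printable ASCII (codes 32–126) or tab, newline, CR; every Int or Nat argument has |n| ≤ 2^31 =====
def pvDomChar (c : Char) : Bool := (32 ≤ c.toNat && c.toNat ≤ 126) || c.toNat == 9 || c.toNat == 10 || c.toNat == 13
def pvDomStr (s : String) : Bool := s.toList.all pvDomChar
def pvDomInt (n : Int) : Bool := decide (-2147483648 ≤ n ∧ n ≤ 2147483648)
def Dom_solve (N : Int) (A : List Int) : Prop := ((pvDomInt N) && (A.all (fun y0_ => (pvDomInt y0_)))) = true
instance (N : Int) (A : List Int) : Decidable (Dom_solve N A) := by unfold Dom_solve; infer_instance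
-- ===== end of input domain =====

-- B replaces A's dependency graph + indegree array + heap by a one-off sort of the
-- (value, index) pairs and a rescan picking the first index with no remaining earlier
-- non-coprime index (objective: simpler; same return value).

-- ===== PORT A =====

-- termination fact for the Euclid loop (cited by gcdLoop's decreasing_by)
theorem pymod_natAbs_lt (x y : Int) (h : ¬ y = 0) : (PySem.Int.mod x y).natAbs < y.natAbs := by
  rcases lt_or_gt_of_ne h with hy | hy
  · have h1 := (PySem.Int.mod_neg_bounds x hy).1
    have h2 := (PySem.Int.mod_neg_bounds x hy).2
    omega
  · have h1 := PySem.Int.mod_nonneg x hy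
    have h2 := PySem.Int.mod_lt x hy
    omega

-- the while-loop of A's gcd
def gcdLoop (x y : Int) : Int :=
  if h : y = 0 then x else gcdLoop y (PySem.Int.mod x y)
termination_by y.natAbs
decreasing_by exact pymod_natAbs_lt x y h

def gcdA (x y : Int) : Int := if x > y then gcdLoop y x else gcdLoop x y

-- list subscription A[i] (indices here are always in range under Pre_solve)
def aget (A : List Int) (i : Nat) : Int := A.getD i 0

-- Python lists G / degrees are modelled as functions Nat → _, updated pointwise
def buildInner (A : List Int) (node : Nat) (st : (Nat → List Nat) × (Nat → Int)) (nxt : Nat) :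
    (Nat → List Nat) × (Nat → Int) :=
  if gcdA (aget A node) (aget A nxt) == 1 then st
  else (fun i => if i = node then st.1 i ++ [nxt] else st.1 i,
        fun i => if i = nxt then st.2 i + 1 else st.2 i)

def outerStep (A : List Int) (n : Nat) (st : (Nat → List Nat) × (Nat → Int)) (node : Nat) :
    (Nat → List Nat) × (Nat → Int) :=
  (List.range' (node+1) (n-node-1)).foldl (buildInner A node) st

def build (A : List Int) (n : Nat) : (Nat → List Nat) × (Nat → Int) :=
  (List.range (n-1)).foldl (outerStep A n) (fun _ => [], fun _ => 0)

-- heapq on tuples with pairwise-distinct keys behaves exactly like an ordered list: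
-- heapify = sort, heappush = ordered insert, heappop = take the head (the unique
-- minimum); all keys (A[node], node) are distinct, so this port is exact.
def keyLt (p q : Int × Nat) : Bool := p.1 < q.1 || (p.1 == q.1 && p.2 < q.2)

def pqInsert (x : Int × Nat) : List (Int × Nat) → List (Int × Nat)
  | [] => [x]
  | y :: ys => if keyLt x y then x :: y :: ys else y :: pqInsert x ys

def pqSort (l : List (Int × Nat)) : List (Int × Nat) := l.foldr pqInsert []

-- body of A's 'for next in G[node]' loop
def popStep (A : List Int) (st : (Nat → Int) × List (Int × Nat)) (nxt : Nat) :
    (Nat → Int) × List (Int × Nat) :=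
  let d : Nat → Int := fun i => if i = nxt then st.1 i - 1 else st.1 i
  if d nxt = 0 then (d, pqInsert (aget A nxt, nxt) st.2) else (d, st.2)

-- A's while-heap loop; fuel 2*n+1 strictly exceeds the number of iterations (each
-- index is pushed at most once, so there are at most n pops)
def loopA (A : List Int) (G : Nat → List Nat) :
    Nat → (Nat → Int) → List (Int × Nat) → List Int → List Int
  | 0, _, _, res => res
  | fuel+1, deg, heap, res =>
    match heap with
    | [] => res
    | (element, node) :: rest =>
      let st := (G node).foldl (popStep A) (deg, rest)
      loopA A G fuel st.1 st.2 (res ++ [element])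

def solve (N : Int) (A : List Int) : List Int :=
  let n := N.toNat
  let gd := build A n
  let heap := pqSort (((List.range n).filter (fun node => gd.2 node == 0)).map
    (fun node => (aget A node, node)))
  loopA A gd.1 (2*n+1) gd.2 heap []

-- ===== PORT B =====

-- all(removed[i] or gcd(A[i], v) == 1 for i in range(j))
def readyB (A : List Int) (removed : Nat → Bool) (j : Nat) (v : Int) : Bool :=
  (List.range j).all (fun i => removed i || (gcdA (aget A i) v == 1))

-- the scan 'for v, j in order: …' picking the first ready index
def findPick (A : List Int) (removed : Nat → Bool) : List (Int × Nat) → Option Nat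
  | [] => none
  | (v, j) :: rest =>
    if removed j then findPick A removed rest
    else if readyB A removed j v then some j
    else findPick A removed rest

-- 'for _ in range(N)': exactly n rounds
def loopB (A : List Int) (order : List (Int × Nat)) :
    Nat → (Nat → Bool) → List Int → List Int
  | 0, _, out => out
  | k+1, removed, out =>
    match findPick A removed order with
    | none => out
    | some pick => loopB A order k (fun i => if i = pick then true else removed i) (out ++ [aget A pick])

def solve_alt (N : Int) (A : List Int) : List Int :=
  let n := N.toNat
  -- Python's sorted on pairwise-distinct tuples = any lexicographic sort; ordered insertion here
  let order := pqSort ((List.range n).map (fun j => (aget A j, j)))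
  loopB A order n (fun _ => false) []

-- ===== PRECONDITION & SPEC =====

-- Pre_ excludes exactly the inputs on which Python A raises IndexError (A reads A[node]
-- for every node < N, so it raises iff N > len(A)); B raises there as well.
def Pre_solve (N : Int) (A : List Int) : Prop := N ≤ (A.length : Int)
instance (N : Int) (A : List Int) : Decidable (Pre_solve N A) := by unfold Pre_solve; infer_instance

def pvWitness_solve : Int × List Int := (3, [4, 6, 35])

def Spec_solve (N : Int) (A : List Int) (out : List Int) : Prop := out = solve_alt N A
instance (N : Int) (A : List Int) (out : List Int) : Decidable (Spec_solve N A out) := by unfold Spec_solve; infer_instance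

-- ===== CLAIM (what is proved, stated in full; the proofs are below) =====
def Claim_equal_solve : Prop := ∀ (N : Int) (A : List Int), Dom_solve N A → Pre_solve N A → Spec_solve N A (solve N A)

-- ===== LEMMAS AND PROOFS =====

-- conflict test between indices i and j (gcd of their values differs from 1)
def cfb (A : List Int) (i j : Nat) : Bool := !(gcdA (aget A i) (aget A j) == 1)

-- number of remaining earlier conflicting indices ("blockers") of j
def blockCount (A : List Int) (r : Nat → Bool) (j : Nat) : Nat :=
  (List.range j).countP (fun i => !r i && cfb A i j)

-- j can be output next: not removed and no remaining blocker
def pickable (A : List Int) (r : Nat → Bool) (j : Nat) : Prop :=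
  r j = false ∧ blockCount A r j = 0

-- lexicographic strict order on (value, index) pairs (Python tuple <)
def kLT (p q : Int × Nat) : Prop := p.1 < q.1 ∨ (p.1 = q.1 ∧ p.2 < q.2)

-- the adjacency list A's build loop produces for node
def cList (A : List Int) (n node : Nat) : List Nat :=
  (List.range' (node+1) (n-node-1)).filter (fun j => cfb A node j)

def orderL (A : List Int) (n : Nat) : List (Int × Nat) :=
  pqSort ((List.range n).map (fun j => (aget A j, j)))

-- invariant tying A's heap to the set of pickable indices
def HeapInv (A : List Int) (n : Nat) (r : Nat → Bool) (heap : List (Int × Nat)) : Prop :=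
  List.Pairwise kLT heap ∧
  ∀ p, p ∈ heap ↔ ∃ j, j < n ∧ p = (aget A j, j) ∧ pickable A r j

theorem kLT_asymm (p q : Int × Nat) : kLT p q → ¬ kLT q p := by
  unfold kLT; omega

theorem kLT_trans (p q r : Int × Nat) : kLT p q → kLT q r → kLT p r := by
  unfold kLT; omega

theorem kLT_of_ne (p q : Int × Nat) (h : p ≠ q) : kLT p q ∨ kLT q p := by
  have h' : ¬ (p.1 = q.1 ∧ p.2 = q.2) := by
    intro hc; exact h (Prod.ext hc.1 hc.2)
  unfold kLT; omega

theorem keyLt_iff (p q : Int × Nat) : keyLt p q = true ↔ kLT p q := by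
  simp [keyLt, kLT]

theorem mem_pqInsert (x q : Int × Nat) (l : List (Int × Nat)) :
    q ∈ pqInsert x l ↔ q = x ∨ q ∈ l := by
  induction l with
  | nil => simp [pqInsert]
  | cons y ys ih =>
    by_cases h : keyLt x y = true
    · simp [pqInsert, h]
    · simp [pqInsert, h, ih]; tauto

theorem pqInsert_perm (x : Int × Nat) (l : List (Int × Nat)) :
    (pqInsert x l).Perm (x :: l) := by
  induction l with
  | nil => simp [pqInsert]
  | cons y ys ih =>
    by_cases h : keyLt x y = true
    · simp [pqInsert, h]
    · simp only [pqInsert, h, if_neg]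
      exact List.Perm.trans (List.Perm.cons y ih) (List.Perm.swap x y ys)

theorem pairwise_pqInsert (x : Int × Nat) (l : List (Int × Nat))
    (hx : x ∉ l) (hl : l.Pairwise kLT) : (pqInsert x l).Pairwise kLT := by
  induction l with
  | nil => simp [pqInsert]
  | cons y ys ih =>
    rcases List.pairwise_cons.mp hl with ⟨hy, hys⟩
    by_cases h : keyLt x y = true
    · have hxy : kLT x y := (keyLt_iff x y).mp h
      simp only [pqInsert, h, if_pos]
      refine List.pairwise_cons.mpr ⟨?_, hl⟩
      intro z hz
      rcases List.mem_cons.mp hz with rfl | hz'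
      · exact hxy
      · exact kLT_trans _ _ _ hxy (hy z hz')
    · have hne : x ≠ y := by intro hc; exact hx (by simp [hc])
      have hyx : kLT y x := by
        rcases kLT_of_ne x y hne with h1 | h1
        · exact absurd ((keyLt_iff x y).mpr h1) h
        · exact h1
      simp only [pqInsert, h, if_neg]
      refine List.pairwise_cons.mpr ⟨?_, ih (by intro hc; exact hx (by simp [hc])) hys⟩
      intro z hz
      rcases (mem_pqInsert x z ys).mp hz with rfl | hz'
      · exact hyx
      · exact hy z hz'

theorem pqSort_perm (l : List (Int × Nat)) : (pqSort l).Perm l := by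
  induction l with
  | nil => simp [pqSort]
  | cons y ys ih =>
    exact List.Perm.trans (pqInsert_perm y (pqSort ys)) (List.Perm.cons y ih)

theorem mem_pqSort (p : Int × Nat) (l : List (Int × Nat)) : p ∈ pqSort l ↔ p ∈ l :=
  (pqSort_perm l).mem_iff

theorem pairwise_pqSort (l : List (Int × Nat)) (hl : l.Nodup) :
    (pqSort l).Pairwise kLT := by
  induction l with
  | nil => simp [pqSort]
  | cons y ys ih =>
    rcases List.nodup_cons.mp hl with ⟨hy, hys⟩
    refine pairwise_pqInsert y (pqSort ys) ?_ (ih hys)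
    intro hc; exact hy ((mem_pqSort y ys).mp hc)

-- counting helper: flipping one predicate value to false
theorem countP_flip (l : List Nat) (p p' : Nat → Bool) (x : Nat) (hn : l.Nodup)
    (hag : ∀ y ∈ l, y ≠ x → p' y = p y) (hx : p' x = false) :
    l.countP p' = l.countP p - (if x ∈ l ∧ p x = true then 1 else 0) ∧
    (x ∈ l → p x = true → 1 ≤ l.countP p) := by
  induction l with
  | nil => simp
  | cons a t ih =>
    rcases List.nodup_cons.mp hn with ⟨hax, hnt⟩
    obtain ⟨ih1, ih2⟩ := ih hnt (fun y hy hne => hag y (List.mem_cons_of_mem a hy) hne)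
    by_cases hax' : a = x
    · subst hax'
      have h1 : t.countP p' = t.countP p :=
        List.countP_congr (fun y hy => by
          rw [hag y (List.mem_cons_of_mem _ hy) (fun hc => hax (hc ▸ hy))])
      constructor
      · rw [List.countP_cons, List.countP_cons, hx, h1]
        have hm : a ∈ a :: t := List.mem_cons_self
        cases hp : p a <;> simp [hp, hm] <;> omega
      · intro _ hp; rw [List.countP_cons, hp]; simp
    · have hpa : p' a = p a := hag a List.mem_cons_self (fun hc => hax' hc)
      have hmem : (x ∈ a :: t ∧ p x = true) ↔ (x ∈ t ∧ p x = true) := by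
        constructor
        · rintro ⟨h1, h2⟩
          rcases List.mem_cons.mp h1 with h3 | h3
          · exact absurd h3.symm hax'
          · exact ⟨h3, h2⟩
        · rintro ⟨h1, h2⟩; exact ⟨List.mem_cons_of_mem a h1, h2⟩
      constructor
      · rw [List.countP_cons, List.countP_cons, hpa, ih1]
        by_cases hc : x ∈ t ∧ p x = true
        · rw [if_pos hc, if_pos (hmem.mpr hc)]
          have := ih2 hc.1 hc.2
          cases hp : p a <;> simp <;> omega
        · rw [if_neg hc, if_neg (fun h => hc (hmem.mp h))]
          simp
      · intro h1 h2
        rw [List.countP_cons]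
        rcases List.mem_cons.mp h1 with h3 | h3
        · exact absurd h3.symm hax'
        · have := ih2 h3 h2; omega

theorem count_nodup (l : List Nat) (hl : l.Nodup) (a : Nat) :
    l.count a = if a ∈ l then 1 else 0 := by
  by_cases h : a ∈ l
  · rw [if_pos h]
    have h1 := List.nodup_iff_count_le_one.mp hl a
    have h2 : 0 < l.count a := List.count_pos_iff.mpr h
    omega
  · rw [if_neg h, List.count_eq_zero]
    exact h

theorem mem_cList (A : List Int) (n node j : Nat) :
    j ∈ cList A n node ↔ node < j ∧ j < n ∧ cfb A node j = true := by
  simp only [cList, List.mem_filter, List.mem_range']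
  have h : (∃ i < n - node - 1, j = node + 1 + 1 * i) ↔ (node < j ∧ j < n) := by
    constructor
    · rintro ⟨i, hi, rfl⟩; omega
    · intro hj; exact ⟨j - node - 1, by omega, by omega⟩
  rw [h, and_assoc]

-- build characterisation
theorem nodup_cList (A : List Int) (n node : Nat) : (cList A n node).Nodup :=
  (List.nodup_range' (step := 1)).filter _

theorem innerG (A : List Int) (node : Nat) :
    ∀ (ns : List Nat) (st : (Nat → List Nat) × (Nat → Int)) (i : Nat),
      ((ns.foldl (buildInner A node) st).1) i =
        if i = node then st.1 i ++ ns.filter (fun j => cfb A node j) else st.1 i := by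
  intro ns
  induction ns with
  | nil => intro st i; by_cases hi : i = node <;> simp [hi]
  | cons a t ih =>
    intro st i
    rw [List.foldl_cons, ih]
    by_cases hg : (gcdA (aget A node) (aget A a) == 1) = true
    · have hc : cfb A node a = false := by simp [cfb, hg]
      simp [buildInner, hg, List.filter_cons, hc]
    · have hc : cfb A node a = true := by simp [cfb]; simpa using hg
      simp only [buildInner, hg, if_neg, Bool.false_eq_true, not_false_iff, List.filter_cons, hc,
        if_true]
      by_cases hi : i = node <;> simp [hi, List.append_assoc]

theorem innerD (A : List Int) (node : Nat) :
    ∀ (ns : List Nat) (st : (Nat → List Nat) × (Nat → Int)) (j : Nat),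
      ((ns.foldl (buildInner A node) st).2) j =
        st.2 j + (((ns.filter (fun x => cfb A node x)).count j : Nat) : Int) := by
  intro ns
  induction ns with
  | nil => intro st j; simp
  | cons a t ih =>
    intro st j
    rw [List.foldl_cons, ih]
    by_cases hg : (gcdA (aget A node) (aget A a) == 1) = true
    · have hc : cfb A node a = false := by simp [cfb, hg]
      simp [buildInner, hg, List.filter_cons, hc]
    · have hc : cfb A node a = true := by simp [cfb]; simpa using hg
      simp only [buildInner, hg, if_neg, Bool.false_eq_true, not_false_iff, List.filter_cons, hc,
        if_true]
      by_cases hj : j = a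
      · subst hj; simp [List.count_cons]; push_cast; ring
      · have haj : (a == j) = false := by
          simp only [beq_eq_false_iff_ne, ne_eq]
          exact fun h => hj h.symm
        simp [List.count_cons, haj, hj]

theorem outerG (A : List Int) (n : Nat) : ∀ (m node : Nat),
    (((List.range m).foldl (outerStep A n) (fun _ => ([] : List Nat), fun _ => (0 : Int))).1) node =
      if node < m then cList A n node else [] := by
  intro m
  induction m with
  | zero => intro node; simp
  | succ m ih =>
    intro node
    rw [List.range_succ, List.foldl_append, List.foldl_cons, List.foldl_nil]
    rw [outerStep, innerG]
    by_cases h1 : node = m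
    · subst h1
      rw [if_pos rfl, ih, if_neg (Nat.lt_irrefl node), if_pos (Nat.lt_succ_self node)]
      rfl
    · rw [if_neg h1, ih]
      by_cases h2 : node < m
      · rw [if_pos h2, if_pos (Nat.lt_succ_of_lt h2)]
      · rw [if_neg h2, if_neg (by omega)]

theorem outerD (A : List Int) (n : Nat) : ∀ (m j : Nat),
    (((List.range m).foldl (outerStep A n) (fun _ => ([] : List Nat), fun _ => (0 : Int))).2) j =
      (((List.range m).countP (fun i => decide (i < j) && cfb A i j && decide (j < n)) : Nat) : Int) := by
  intro m
  induction m with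
  | zero => intro j; simp
  | succ m ih =>
    intro j
    rw [List.range_succ, List.foldl_append, List.foldl_cons, List.foldl_nil]
    rw [outerStep, innerD, ih, List.countP_append]
    have hcl : (List.range' (m+1) (n-m-1)).filter (fun x => cfb A m x) = cList A n m := rfl
    rw [hcl]
    have hcount : (cList A n m).count j
        = if (decide (m < j) && cfb A m j && decide (j < n)) = true then 1 else 0 := by
      rw [count_nodup _ (nodup_cList A n m) j]
      by_cases hm : j ∈ cList A n m
      · obtain ⟨ha, hb, hc⟩ := (mem_cList A n m j).mp hm
        rw [if_pos hm, if_pos (by simp [ha, hb, hc])]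
      · rw [if_neg hm, if_neg (by
          intro hc
          simp only [Bool.and_eq_true, decide_eq_true_eq] at hc
          exact hm ((mem_cList A n m j).mpr ⟨hc.1.1, hc.2, hc.1.2⟩))]
    rw [hcount, List.countP_cons, List.countP_nil]
    by_cases hc : (decide (m < j) && cfb A m j && decide (j < n)) = true
    · rw [if_pos hc]; simp
    · rw [if_neg hc]; simp

theorem build_G (A : List Int) (n node : Nat) : (build A n).1 node = cList A n node := by
  rw [build, outerG]
  by_cases h : node < n - 1
  · rw [if_pos h]
  · rw [if_neg h]
    have : n - node - 1 = 0 := by omega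
    simp [cList, this]

theorem build_deg (A : List Int) (n j : Nat) (hj : j < n) :
    (build A n).2 j = (blockCount A (fun _ => false) j : Int) := by
  rw [build, outerD, blockCount]
  congr 1
  have hsplit : n - 1 = j + (n - 1 - j) := by omega
  rw [hsplit, List.range_add, List.countP_append]
  have h2 : ((List.range (n-1-j)).map (fun k => j + k)).countP
      (fun i => decide (i < j) && cfb A i j && decide (j < n)) = 0 := by
    rw [List.countP_eq_zero]
    intro a ha
    obtain ⟨k, _, rfl⟩ := List.mem_map.mp ha
    simp [Nat.not_lt.mpr (Nat.le_add_right j k)]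
  rw [h2, Nat.add_zero]
  apply List.countP_congr
  intro i hi
  have : i < j := List.mem_range.mp hi
  simp [this, hj]

theorem readyB_iff (A : List Int) (r : Nat → Bool) (j : Nat) :
    readyB A r j (aget A j) = true ↔ blockCount A r j = 0 := by
  rw [readyB, blockCount, List.countP_eq_zero, List.all_eq_true]
  constructor
  · intro h i hi
    have := h i hi
    simp only [Bool.or_eq_true] at this
    simp only [Bool.and_eq_true, Bool.not_eq_true']
    rintro ⟨h1, h2⟩
    rcases this with h3 | h3
    · rw [h3] at h1; exact absurd h1 (by simp)
    · rw [cfb, h3] at h2; exact absurd h2 (by simp)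
  · intro h i hi
    have := h i hi
    simp only [Bool.and_eq_true, Bool.not_eq_true', not_and] at this
    simp only [Bool.or_eq_true]
    by_cases hr : r i = true
    · exact Or.inl hr
    · right
      have := this (by simp [hr])
      rw [cfb] at this
      simpa using this
-- the scan over the sorted order list returns exactly the head of the heap
theorem bridge (A : List Int) (r : Nat → Bool) (heap : List (Int × Nat)) (hh : heap.Pairwise kLT) :
    ∀ l : List (Int × Nat), l.Pairwise kLT →
      (∀ p ∈ l, p = (aget A p.2, p.2)) →
      (∀ p ∈ heap, p ∈ l) →
      (∀ p ∈ l, (p ∈ heap ↔ (r p.2 = false ∧ blockCount A r p.2 = 0))) →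
      findPick A r l = (heap.head?).map (·.2) := by
  intro l
  induction l with
  | nil =>
    intro _ _ hsub _
    have hempty : heap = [] := by
      cases heap with
      | nil => rfl
      | cons q t => exact absurd (hsub q List.mem_cons_self) (by simp)
    subst hempty
    simp [findPick]
  | cons p lt ih =>
    intro hl hshape hsub hchar
    obtain ⟨hp1, hp2⟩ := List.pairwise_cons.mp hl
    have hpshape := hshape p List.mem_cons_self
    obtain ⟨v, j⟩ := p
    have hv : v = aget A j := by simpa using congrArg Prod.fst hpshape
    have hrec : (v, j) ∉ heap →
        findPick A r lt = (heap.head?).map (·.2) := by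
      intro hnm
      exact ih hp2 (fun q hq => hshape q (List.mem_cons_of_mem _ hq))
        (fun q hq => by
          rcases List.mem_cons.mp (hsub q hq) with rfl | h
          · exact absurd hq hnm
          · exact h)
        (fun q hq => hchar q (List.mem_cons_of_mem _ hq))
    by_cases hrj : r j = true
    · have hnm : (v, j) ∉ heap := by
        intro hc
        have := ((hchar _ List.mem_cons_self).mp hc).1
        simp only at this
        rw [hrj] at this; exact absurd this (by simp)
      simp only [findPick, hrj, if_true]
      exact hrec hnm
    · have hrj' : r j = false := by simpa using hrj
      by_cases hbc : blockCount A r j = 0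
      · have hmem : (v, j) ∈ heap := (hchar _ List.mem_cons_self).mpr ⟨hrj', hbc⟩
        cases heap with
        | nil => simp at hmem
        | cons h0 hs =>
          have h0l := hsub h0 List.mem_cons_self
          have h0eq : h0 = (v, j) := by
            rcases List.mem_cons.mp h0l with h | h
            · exact h
            · rcases List.mem_cons.mp hmem with h' | h'
              · exact h'.symm
              · have k1 : kLT h0 (v,j) := (List.pairwise_cons.mp hh).1 _ h'
                have k2 : kLT (v,j) h0 := hp1 _ h
                exact absurd k1 (kLT_asymm _ _ k2)
          have hready : readyB A r j v = true := by
            rw [hv]; exact (readyB_iff A r j).mpr hbc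
          simp [findPick, hrj, hready, h0eq]
      · have hready : readyB A r j v = false := by
          rw [hv]
          cases h : readyB A r j (aget A j)
          · rfl
          · exact absurd ((readyB_iff A r j).mp h) hbc
        have hnm : (v,j) ∉ heap := fun hc => hbc ((hchar _ List.mem_cons_self).mp hc).2
        simp only [findPick, hrj, if_false, hready, Bool.false_eq_true]
        exact hrec hnm

-- the decrement loop over G[node]
theorem foldStep (A : List Int) :
    ∀ (cs : List Nat) (d : Nat → Int) (h : List (Int × Nat)),
      cs.Nodup → h.Pairwise kLT → (∀ x ∈ cs, (aget A x, x) ∉ h) →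
      (∀ j, ((cs.foldl (popStep A) (d, h)).1) j = d j - (if j ∈ cs then 1 else 0)) ∧
      ((cs.foldl (popStep A) (d, h)).2).Pairwise kLT ∧
      (∀ p, p ∈ (cs.foldl (popStep A) (d, h)).2 ↔
        p ∈ h ∨ ∃ x, x ∈ cs ∧ d x = 1 ∧ p = (aget A x, x)) := by
  intro cs
  induction cs with
  | nil =>
    intro d h _ hp _
    refine ⟨fun j => by simp, hp, fun p => by simp⟩
  | cons a t ih =>
    intro d h hn hp hni
    rcases List.nodup_cons.mp hn with ⟨hat, hnt⟩
    rw [List.foldl_cons]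
    by_cases hz : d a = 1
    · have hda : d a = 1 := hz
      have hstep : popStep A (d, h) a = ((fun i => if i = a then d i - 1 else d i),
          pqInsert (aget A a, a) h) := by
        simp only [popStep]
        rw [if_pos (by simp [hz])]
      rw [hstep]
      have hnotin : (aget A a, a) ∉ h := hni a List.mem_cons_self
      obtain ⟨ih1, ih2, ih3⟩ := ih (fun i => if i = a then d i - 1 else d i)
        (pqInsert (aget A a, a) h) hnt
        (pairwise_pqInsert _ _ hnotin hp)
        (fun x hx => by
          rw [mem_pqInsert]
          rintro (h1 | h1)
          · have : x = a := by simpa using congrArg Prod.snd h1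
            exact hat (this ▸ hx)
          · exact hni x (List.mem_cons_of_mem a hx) h1)
      refine ⟨?_, ih2, ?_⟩
      · intro j
        rw [ih1 j]
        by_cases hja : j = a
        · subst hja
          have : j ∉ t := hat
          simp [this]
        · simp [hja]
      · intro p
        rw [ih3 p, mem_pqInsert]
        constructor
        · rintro ((h1 | h1) | ⟨x, hx, hdx, hpx⟩)
          · exact Or.inr ⟨a, List.mem_cons_self, hda, h1⟩
          · exact Or.inl h1
          · have hxa : x ≠ a := fun hc => hat (hc ▸ hx)
            rw [if_neg hxa] at hdx
            exact Or.inr ⟨x, List.mem_cons_of_mem a hx, hdx, hpx⟩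
        · rintro (h1 | ⟨x, hx, hdx, hpx⟩)
          · exact Or.inl (Or.inr h1)
          · rcases List.mem_cons.mp hx with rfl | hx'
            · exact Or.inl (Or.inl hpx)
            · have hxa : x ≠ a := fun hc => hat (hc ▸ hx')
              exact Or.inr ⟨x, hx', by rw [if_neg hxa]; exact hdx, hpx⟩
    · have hstep : popStep A (d, h) a = ((fun i => if i = a then d i - 1 else d i), h) := by
        simp only [popStep]
        rw [if_neg (by simp; omega)]
      rw [hstep]
      have hda : d a ≠ 1 := hz
      obtain ⟨ih1, ih2, ih3⟩ := ih (fun i => if i = a then d i - 1 else d i) h hnt hp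
        (fun x hx => hni x (List.mem_cons_of_mem a hx))
      refine ⟨?_, ih2, ?_⟩
      · intro j
        rw [ih1 j]
        by_cases hja : j = a
        · subst hja
          have : j ∉ t := hat
          simp [this]
        · simp [hja]
      · intro p
        rw [ih3 p]
        constructor
        · rintro (h1 | ⟨x, hx, hdx, hpx⟩)
          · exact Or.inl h1
          · have hxa : x ≠ a := fun hc => hat (hc ▸ hx)
            rw [if_neg hxa] at hdx
            exact Or.inr ⟨x, List.mem_cons_of_mem a hx, hdx, hpx⟩
        · rintro (h1 | ⟨x, hx, hdx, hpx⟩)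
          · exact Or.inl h1
          · rcases List.mem_cons.mp hx with rfl | hx'
            · exact absurd hdx hda
            · have hxa : x ≠ a := fun hc => hat (hc ▸ hx')
              exact Or.inr ⟨x, hx', by rw [if_neg hxa]; exact hdx, hpx⟩

theorem blockCount_update (A : List Int) (r : Nat → Bool) (node j : Nat)
    (hnode : r node = false) :
    blockCount A (fun i => if i = node then true else r i) j =
      blockCount A r j - (if node < j ∧ cfb A node j = true then 1 else 0) ∧
    (node < j → cfb A node j = true → 1 ≤ blockCount A r j) := by
  obtain ⟨h1, h2⟩ := countP_flip (List.range j) (fun i => !r i && cfb A i j)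
    (fun i => !(if i = node then true else r i) && cfb A i j) node (List.nodup_range)
    (fun y _ hy => by simp [hy]) (by simp)
  have hcond : (node ∈ List.range j ∧ ((!r node && cfb A node j) = true)) ↔
      (node < j ∧ cfb A node j = true) := by
    simp [List.mem_range, hnode]
  constructor
  · simp only [blockCount]
    by_cases hc : node < j ∧ cfb A node j = true
    · rw [h1, if_pos (hcond.mpr hc), if_pos hc]
    · rw [h1, if_neg (fun h => hc (hcond.mp h)), if_neg hc]
  · intro ha hb
    exact h2 (List.mem_range.mpr ha) (by simp [hnode, hb])

theorem step_pickable (A : List Int) (r : Nat → Bool) (node : Nat)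
    (hpick : pickable A r node)
    (hdown : ∀ j, r j = true → ∀ i, i < j → cfb A i j = true → r i = true)
    (j : Nat) :
    pickable A (fun i => if i = node then true else r i) j ↔
      ((pickable A r j ∧ j ≠ node) ∨ (node < j ∧ cfb A node j = true ∧ blockCount A r j = 1)) := by
  obtain ⟨hrn, hbn⟩ := hpick
  obtain ⟨hupd, hlow⟩ := blockCount_update A r node j hrn
  unfold pickable
  constructor
  · rintro ⟨h1, h2⟩
    have hjn : j ≠ node := by
      intro hc; subst hc; simp at h1
    have hrj : r j = false := by simpa [hjn] using h1
    by_cases hb : node < j ∧ cfb A node j = true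
    · right
      refine ⟨hb.1, hb.2, ?_⟩
      have := hlow hb.1 hb.2
      rw [hupd, if_pos hb] at h2
      omega
    · left
      refine ⟨⟨hrj, ?_⟩, hjn⟩
      rw [hupd, if_neg hb] at h2
      omega
  · rintro (⟨⟨hrj, hb⟩, hjn⟩ | ⟨h1, h2, h3⟩)
    · refine ⟨by simp [hjn, hrj], ?_⟩
      rw [hupd, hb]
      omega
    · have hjn : j ≠ node := by omega
      have hrj : r j = false := by
        cases hc : r j
        · rfl
        · have := hdown j hc node h1 h2
          rw [hrn] at this
          exact absurd this (by simp)
      refine ⟨by simp [hjn, hrj], ?_⟩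
      rw [hupd, if_pos ⟨h1, h2⟩, h3]

theorem mem_orderL (A : List Int) (n : Nat) (p : Int × Nat) :
    p ∈ orderL A n ↔ p.2 < n ∧ p = (aget A p.2, p.2) := by
  rw [orderL, mem_pqSort, List.mem_map]
  constructor
  · rintro ⟨j, hj, rfl⟩
    exact ⟨List.mem_range.mp hj, rfl⟩
  · rintro ⟨h1, h2⟩
    exact ⟨p.2, List.mem_range.mpr h1, h2.symm⟩

theorem pairwise_orderL (A : List Int) (n : Nat) : (orderL A n).Pairwise kLT := by
  apply pairwise_pqSort
  apply List.Nodup.map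
  · intro a b hab
    simpa using congrArg Prod.snd hab
  · exact List.nodup_range

theorem case_empty (A : List Int) (n : Nat) (G : Nat → List Nat) (r : Nat → Bool)
    (hnp : ∀ j, j < n → ¬ pickable A r j) :
    ∀ (k₁ k₂ : Nat) (deg : Nat → Int) (res : List Int),
      loopA A G k₁ deg [] res = loopB A (orderL A n) k₂ r res := by
  intro k₁ k₂ deg res
  have hfp : findPick A r (orderL A n) = none := by
    have := bridge A r [] List.Pairwise.nil (orderL A n) (pairwise_orderL A n)
      (fun p hp => ((mem_orderL A n p).mp hp).2)
      (fun p hp => by simp at hp)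
      (fun p hp => by
        constructor
        · intro hc; simp at hc
        · rintro ⟨ha, hb⟩
          exact absurd ⟨ha, hb⟩ (hnp p.2 ((mem_orderL A n p).mp hp).1))
    simpa using this
  cases k₁ <;> cases k₂ <;> simp [loopA, loopB, hfp]

theorem main_loop (A : List Int) (n : Nat) (G : Nat → List Nat)
    (hG : ∀ node, G node = cList A n node) :
    ∀ (m : Nat), ∀ (k₁ k₂ : Nat) (r : Nat → Bool) (deg : Nat → Int)
      (heap : List (Int × Nat)) (res : List Int),
      HeapInv A n r heap →
      (∀ j, j < n → deg j = (blockCount A r j : Int)) →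
      (∀ j, r j = true → ∀ i, i < j → cfb A i j = true → r i = true) →
      (List.range n).countP (fun j => !r j) ≤ m → m ≤ k₁ → m ≤ k₂ →
      loopA A G k₁ deg heap res = loopB A (orderL A n) k₂ r res := by
  intro m
  induction m with
  | zero =>
    intro k₁ k₂ r deg heap res hInv hdeg hdown hrem h1 h2
    have hheap : heap = [] := by
      cases hh : heap with
      | nil => rfl
      | cons p t =>
        obtain ⟨j, hj, hpj, hpick⟩ := (hInv.2 p).mp (by rw [hh]; exact List.mem_cons_self)
        have : 0 < (List.range n).countP (fun j => !r j) := by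
          rw [List.countP_pos_iff]
          exact ⟨j, List.mem_range.mpr hj, by simp [hpick.1]⟩
        omega
    subst hheap
    exact case_empty A n G r
      (fun j hj hp => by
        have : (aget A j, j) ∈ ([] : List (Int × Nat)) := (hInv.2 _).mpr ⟨j, hj, rfl, hp⟩
        simp at this)
      k₁ k₂ deg res
  | succ m ih =>
    intro k₁ k₂ r deg heap res hInv hdeg hdown hrem h1 h2
    obtain ⟨hpw, hmem⟩ := hInv
    cases hh : heap with
    | nil =>
      subst hh
      exact case_empty A n G r
        (fun j hj hp => by
          have : (aget A j, j) ∈ ([] : List (Int × Nat)) := (hmem _).mpr ⟨j, hj, rfl, hp⟩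
          simp at this)
        k₁ k₂ deg res
    | cons p rest =>
      subst hh
      obtain ⟨e, node⟩ := p
      obtain ⟨j0, hj0n, hj0eq, hj0pick⟩ := (hmem (e, node)).mp List.mem_cons_self
      have hje : node = j0 := by simpa using congrArg Prod.snd hj0eq
      subst hje
      have he : e = aget A node := by simpa using congrArg Prod.fst hj0eq
      have hrem1 : 0 < (List.range n).countP (fun j => !r j) := by
        rw [List.countP_pos_iff]
        exact ⟨node, List.mem_range.mpr hj0n, by simp [hj0pick.1]⟩
      obtain ⟨k₁', rfl⟩ : ∃ k, k₁ = k + 1 := ⟨k₁ - 1, by omega⟩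
      obtain ⟨k₂', rfl⟩ : ∃ k, k₂ = k + 1 := ⟨k₂ - 1, by omega⟩
      -- the scan finds exactly node
      have hfp : findPick A r (orderL A n) = some node := by
        have := bridge A r ((e, node) :: rest) hpw (orderL A n) (pairwise_orderL A n)
          (fun p hp => ((mem_orderL A n p).mp hp).2)
          (fun p hp => by
            obtain ⟨j, hj, hpj, hpick⟩ := (hmem p).mp hp
            exact (mem_orderL A n p).mpr ⟨by rw [hpj]; exact hj, by rw [hpj]⟩)
          (fun p hp => by
            constructor
            · intro hc
              obtain ⟨j, hj, hpj, hpick⟩ := (hmem p).mp hc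
              have : p.2 = j := by rw [hpj]
              rw [this]; exact hpick
            · rintro ⟨ha, hb⟩
              obtain ⟨hpn, hps⟩ := (mem_orderL A n p).mp hp
              exact (hmem p).mpr ⟨p.2, hpn, hps, ha, hb⟩)
        simpa using this
      -- characterise the fold over G[node]
      have hcs : G node = cList A n node := hG node
      have hcsn : (cList A n node).Nodup := nodup_cList A n node
      have hni : ∀ x ∈ cList A n node, (aget A x, x) ∉ rest := by
        intro x hx hc
        obtain ⟨hx1, hx2, hx3⟩ := (mem_cList A n node x).mp hx
        obtain ⟨j, hj, hpj, hpick⟩ := (hmem _).mp (List.mem_cons_of_mem _ hc)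
        have hxj : x = j := by simpa using congrArg Prod.snd hpj
        subst hxj
        have h0 : 0 < blockCount A r x := by
          rw [blockCount, List.countP_pos_iff]
          exact ⟨node, List.mem_range.mpr hx1, by simp [hj0pick.1, hx3]⟩
        obtain ⟨-, hb⟩ := hpick
        omega
      have hrest : rest.Pairwise kLT := (List.pairwise_cons.mp hpw).2
      obtain ⟨f1, f2, f3⟩ := foldStep A (cList A n node) deg rest hcsn hrest hni
      simp only [loopA, hcs]
      simp only [loopB, hfp]
      rw [he]
      -- apply the induction hypothesis (new removal function marks node removed)
      apply ih k₁' k₂' (fun i => if i = node then true else r i) _ _ (res ++ [aget A node])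
      · constructor
        · exact f2
        · intro p
          rw [f3 p]
          constructor
          · rintro (h1 | ⟨x, hx, hdx, hpx⟩)
            · obtain ⟨j, hj, hpj, hpickj⟩ := (hmem p).mp (List.mem_cons_of_mem _ h1)
              refine ⟨j, hj, hpj, ?_⟩
              rw [step_pickable A r node hj0pick hdown j]
              left
              refine ⟨hpickj, ?_⟩
              intro hc
              rw [hc] at hpj
              have hp' : p = (e, node) := by rw [hpj, he]
              have hk : kLT (e, node) (e, node) :=
                (List.pairwise_cons.mp hpw).1 _ (hp' ▸ h1)
              exact absurd hk (kLT_asymm _ _ hk)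
            · obtain ⟨hx1, hx2, hx3⟩ := (mem_cList A n node x).mp hx
              refine ⟨x, hx2, hpx, ?_⟩
              rw [step_pickable A r node hj0pick hdown x]
              right
              refine ⟨hx1, hx3, ?_⟩
              have := hdeg x hx2
              omega
          · rintro ⟨j, hj, hpj, hpick⟩
            rw [step_pickable A r node hj0pick hdown j] at hpick
            rcases hpick with ⟨hp1, hp2⟩ | ⟨hp1, hp2, hp3⟩
            · left
              have : p ∈ (e, node) :: rest := (hmem p).mpr ⟨j, hj, hpj, hp1⟩
              rcases List.mem_cons.mp this with hc | hc
              · exfalso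
                rw [hc] at hpj
                have hnj : node = j := by simpa using congrArg Prod.snd hpj
                exact hp2 hnj.symm
              · exact hc
            · right
              refine ⟨j, (mem_cList A n node j).mpr ⟨hp1, hj, hp2⟩, ?_, hpj⟩
              rw [hdeg j hj, hp3]
              norm_num
      · intro j hj
        obtain ⟨hupd, hlow⟩ := blockCount_update A r node j hj0pick.1
        rw [f1 j, hdeg j hj, hupd]
        by_cases hb : node < j ∧ cfb A node j = true
        · have hge := hlow hb.1 hb.2
          rw [if_pos ((mem_cList A n node j).mpr ⟨hb.1, hj, hb.2⟩), if_pos hb]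
          omega
        · rw [if_neg (fun hc => hb ⟨((mem_cList A n node j).mp hc).1,
            ((mem_cList A n node j).mp hc).2.2⟩), if_neg hb]
          omega
      · intro j hjt i hij hcf
        by_cases hjn : j = node
        · subst hjn
          have hb0 : blockCount A r j = 0 := hj0pick.2
          rw [blockCount, List.countP_eq_zero] at hb0
          have := hb0 i (List.mem_range.mpr hij)
          simp only [Bool.and_eq_true, Bool.not_eq_true', not_and] at this
          by_cases hri : r i = true
          · simp [hri]
          · exact absurd hcf (by simpa using this (by simpa using hri))
        · have hjt' : r j = true := by simpa [hjn] using hjt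
          have := hdown j hjt' i hij hcf
          simp [this]
      · -- remaining decreases
        obtain ⟨hc1, hc2⟩ := countP_flip (List.range n) (fun j => !r j)
          (fun j => !(if j = node then true else r j)) node List.nodup_range
          (fun y _ hy => by simp [hy]) (by simp)
        rw [hc1, if_pos ⟨List.mem_range.mpr hj0n, by simp [hj0pick.1]⟩]
        omega
      · omega
      · omega

theorem solve_eq_alt (N : Int) (A : List Int) : solve N A = solve_alt N A := by
  simp only [solve, solve_alt]
  apply main_loop A N.toNat (build A N.toNat).1 (build_G A N.toNat) N.toNat
    (2 * N.toNat + 1) N.toNat (fun _ => false) (build A N.toNat).2 _ []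
  · constructor
    · apply pairwise_pqSort
      apply List.Nodup.map
      · intro a b hab
        simpa using congrArg Prod.snd hab
      · exact List.Nodup.filter _ List.nodup_range
    · intro p
      rw [mem_pqSort, List.mem_map]
      constructor
      · rintro ⟨j, hj, rfl⟩
        obtain ⟨hj1, hj2⟩ := List.mem_filter.mp hj
        have hjn := List.mem_range.mp hj1
        refine ⟨j, hjn, rfl, rfl, ?_⟩
        have hb := build_deg A N.toNat j hjn
        have h0 : (build A N.toNat).2 j = 0 := by simpa using hj2
        rw [hb] at h0
        exact_mod_cast h0
      · rintro ⟨j, hjn, hpj, hpick⟩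
        obtain ⟨-, hb0⟩ := hpick
        refine ⟨j, List.mem_filter.mpr ⟨List.mem_range.mpr hjn, ?_⟩, hpj.symm⟩
        have hb := build_deg A N.toNat j hjn
        rw [hb0] at hb
        simpa using hb
  · intro j hj
    rw [build_deg A N.toNat j hj]
  · intro j hjt
    exact absurd hjt (by simp)
  · simp
  · omega
  · omega

-- ===== VERDICT (by name: the statement is the Claim_ definition above) =====
theorem solve_spec : Claim_equal_solve := by
  intro N A _ _
  unfold Spec_solve
  exact solve_eq_alt N A
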